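-- pv_equiv track=rewrite | github.com/Shaunaksb/AIPractical | shc2.py | calculate_heuristic
-- ===== SOURCE A (Python) =====
-- def calculate_heuristic(stack, goal):
--     score = 0
--     for i in range(len(stack)):
--         if i < len(goal) and stack[i] == goal[i] and stack[:i] == goal[:i]:
--             score += i
--         else:
--             score -= i
--     return score
-- ===== SOURCE B (Python) =====
-- def calculate_heuristic(stack, goal):
--     # length of the longest common prefix of stack and goal
--     p = 0
--     for a, b in zip(stack, goal):
--         if a != b:
--             break
--         p += 1
--     n = len(stack)
--     return p * (p - 1) - n * (n - 1) // 2
-- ===== Notes on version B (the rewrite author's own statement) =====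
-- stated objective: faster
-- what changed: Replaced the quadratic loop that re-compares slice prefixes stack[:i]==goal[:i] at every index with a single zip scan computing the common-prefix length p, then a closed form p*(p-1) - n*(n-1)//2.
import Mathlib
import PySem

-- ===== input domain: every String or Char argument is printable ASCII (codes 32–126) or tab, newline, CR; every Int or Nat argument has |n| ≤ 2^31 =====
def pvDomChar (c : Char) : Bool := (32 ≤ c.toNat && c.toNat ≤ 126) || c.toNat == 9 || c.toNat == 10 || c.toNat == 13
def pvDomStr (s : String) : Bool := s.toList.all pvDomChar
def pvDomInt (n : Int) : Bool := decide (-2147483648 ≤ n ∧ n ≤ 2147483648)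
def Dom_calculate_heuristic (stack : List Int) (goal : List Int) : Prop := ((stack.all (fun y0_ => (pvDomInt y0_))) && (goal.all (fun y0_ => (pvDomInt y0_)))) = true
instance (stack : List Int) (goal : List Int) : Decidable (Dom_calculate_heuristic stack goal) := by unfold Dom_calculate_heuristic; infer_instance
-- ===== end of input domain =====

-- B replaces A's quadratic re-slicing loop by one common-prefix scan plus a closed form (faster, asymptotic).

-- ===== PORT A =====
def calculate_heuristic (stack : List Int) (goal : List Int) : Int :=
  (PySem.List.pyRange 0 (stack.length : Int) 1).foldl
    (fun score i =>
      if (i < (goal.length : Int) ∧ PySem.List.pyGet? stack i = PySem.List.pyGet? goal i ∧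
          PySem.List.slice stack none (some i) = PySem.List.slice goal none (some i))
      then score + i else score - i) 0

-- ===== PORT B =====
-- 'for a, b in zip(stack, goal): if a != b: break; p += 1' — counts the common prefix
def prefLen : List Int → List Int → Nat
  | a :: as, b :: bs => if a ≠ b then 0 else prefLen as bs + 1
  | _, _ => 0

def calculate_heuristic_alt (stack : List Int) (goal : List Int) : Int :=
  let p : Int := (prefLen stack goal : Int)
  let n : Int := (stack.length : Int)
  p * (p - 1) - PySem.Int.floordiv (n * (n - 1)) 2

-- ===== PRECONDITION & SPEC =====
def Spec_calculate_heuristic (stack : List Int) (goal : List Int) (out : Int) : Prop := out = calculate_heuristic_alt stack goal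
instance (stack : List Int) (goal : List Int) (out : Int) : Decidable (Spec_calculate_heuristic stack goal out) := by unfold Spec_calculate_heuristic; infer_instance

-- ===== CLAIM (what is proved, stated in full; the proofs are below) =====
def Claim_equal_calculate_heuristic : Prop := ∀ (stack : List Int) (goal : List Int), Dom_calculate_heuristic stack goal → Spec_calculate_heuristic stack goal (calculate_heuristic stack goal)

-- ===== LEMMAS AND PROOFS =====

lemma prefLen_le_left : ∀ (s g : List Int), prefLen s g ≤ s.length := by
  intro s
  induction s with
  | nil => intro g; cases g <;> simp [prefLen]
  | cons a as ih =>
    intro g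
    cases g with
    | nil => simp [prefLen]
    | cons b bs =>
      simp only [prefLen, List.length_cons]
      split
      · omega
      · have := ih bs; omega

-- characterisation of A's branch condition via the common-prefix length
lemma cond_iff : ∀ (s g : List Int) (i : Nat), i < s.length →
    ((i < g.length ∧ s[i]? = g[i]? ∧ s.take i = g.take i) ↔ i < prefLen s g) := by
  intro s
  induction s with
  | nil => intro g i h; simp at h
  | cons a as ih =>
    intro g i h
    cases g with
    | nil => simp [prefLen]
    | cons b bs =>
      cases i with
      | zero =>
        by_cases hab : a = b <;> simp [prefLen, hab]
      | succ i =>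
        simp only [List.length_cons, Nat.succ_lt_succ_iff, List.getElem?_cons_succ,
          List.take_succ_cons, List.cons.injEq, prefLen] at *
        by_cases hab : a = b
        · simp [hab]
          exact ih bs i (by omega)
        · simp [hab]

lemma tri_succ (n : Nat) : (n + 1) * n / 2 = n * (n - 1) / 2 + n := by
  have h : (n + 1) * n = n * (n - 1) + n * 2 := by
    cases n with
    | zero => rfl
    | succ m => simp; ring
  rw [h]
  generalize n * (n - 1) = k
  omega

-- the loop of A computes min(p,n)*(min(p,n)-1) - n*(n-1)/2
lemma loopA (s g : List Int) : ∀ n, n ≤ s.length →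
    (PySem.List.pyRange 0 (n : Int) 1).foldl
      (fun score i =>
        if (i < (g.length : Int) ∧ PySem.List.pyGet? s i = PySem.List.pyGet? g i ∧
            PySem.List.slice s none (some i) = PySem.List.slice g none (some i))
        then score + i else score - i) 0
    = (min (prefLen s g) n : Int) * ((min (prefLen s g) n : Int) - 1)
      - ((n * (n - 1) / 2 : Nat) : Int) := by
  intro n
  induction n with
  | zero => intro _; simp [PySem.List.pyRange_one_eq_nil]
  | succ n ih =>
    intro hle
    have hrange : PySem.List.pyRange 0 ((n + 1 : Nat) : Int) 1
        = PySem.List.pyRange 0 (n : Int) 1 ++ [(n : Int)] := by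
      have : ((n + 1 : Nat) : Int) = (n : Int) + 1 := by push_cast; ring
      rw [this, PySem.List.pyRange_one_succ_right (by positivity)]
    rw [hrange, List.foldl_append, ih (by omega)]
    simp only [List.foldl_cons, List.foldl_nil]
    have hget : PySem.List.pyGet? s (n : Int) = s[n]? := PySem.List.pyGet?_natCast ..
    have hget' : PySem.List.pyGet? g (n : Int) = g[n]? := PySem.List.pyGet?_natCast ..
    have hsl : PySem.List.slice s none (some (n : Int)) = s.take n :=
      PySem.List.slice_to_natCast ..
    have hsl' : PySem.List.slice g none (some (n : Int)) = g.take n :=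
      PySem.List.slice_to_natCast ..
    have hcond : ((n : Int) < (g.length : Int) ∧ PySem.List.pyGet? s (n : Int) = PySem.List.pyGet? g (n : Int) ∧
          PySem.List.slice s none (some (n : Int)) = PySem.List.slice g none (some (n : Int)))
        ↔ n < prefLen s g := by
      rw [hget, hget', hsl, hsl']
      have := cond_iff s g n (by omega)
      constructor
      · intro ⟨h1, h2, h3⟩; exact this.mp ⟨by exact_mod_cast h1, h2, h3⟩
      · intro h; obtain ⟨h1, h2, h3⟩ := this.mpr h; exact ⟨by exact_mod_cast h1, h2, h3⟩
    simp only [Nat.add_sub_cancel]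
    rw [tri_succ]
    simp only [← Nat.cast_min]
    by_cases hp : n < prefLen s g
    · rw [if_pos (hcond.mpr hp)]
      have h1 : min (prefLen s g) (n + 1) = n + 1 := by omega
      have h2 : min (prefLen s g) n = n := by omega
      rw [h1, h2]
      push_cast
      ring
    · rw [if_neg (fun h => hp (hcond.mp h))]
      have h1 : min (prefLen s g) (n + 1) = min (prefLen s g) n := by omega
      rw [h1]
      push_cast
      ring

lemma triInt (n : Nat) : ((n * (n - 1) / 2 : Nat) : Int) = (n : Int) * ((n : Int) - 1) / 2 := by
  cases n with
  | zero => simp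
  | succ m =>
    rw [Int.natCast_div]
    push_cast [Nat.add_sub_cancel]
    ring_nf

-- ===== VERDICT (by name: the statement is the Claim_ definition above) =====
theorem calculate_heuristic_spec : Claim_equal_calculate_heuristic := by
  intro stack goal _
  show calculate_heuristic stack goal = calculate_heuristic_alt stack goal
  have hB : calculate_heuristic_alt stack goal
      = (prefLen stack goal : Int) * ((prefLen stack goal : Int) - 1)
        - PySem.Int.floordiv ((stack.length : Int) * ((stack.length : Int) - 1)) 2 := rfl
  have hmin : min (prefLen stack goal) stack.length = prefLen stack goal := by
    have := prefLen_le_left stack goal; omega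
  unfold calculate_heuristic
  rw [loopA stack goal stack.length le_rfl, hB,
    PySem.Int.floordiv_eq_ediv_of_pos (by omega : (0:Int) < 2), ← triInt,
    ← Nat.cast_min, hmin]
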